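-- pv_equiv track=rewrite | github.com/Shamrock13/flintlock | src/cashel/juniper.py | expand_application
-- ===== SOURCE A (Python) =====
-- _BROAD_APPS = {"any", "any-ipv4", "any-ipv6", "junos-any", "all", "*"}
--
-- def _normalize_broad(value: str) -> str:
--     text = (value or "").strip()
--     if text.lower() in _BROAD_APPS:
--         return "any"
--     return text
--
-- def _stable_unique(values) -> list[str]:
--     seen = set()
--     output = []
--     for value in values:
--         if value not in seen:
--             seen.add(value)
--             output.append(value)
--     return sorted(output)
--
-- def expand_application(name, applications, application_sets, _seen=None) -> list[str]:
--     normalized = _normalize_broad(name)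
--     if normalized == "any":
--         return ["any"]
--
--     seen = set() if _seen is None else set(_seen)
--     if normalized in seen:
--         return []
--     seen.add(normalized)
--
--     if normalized in application_sets:
--         app_set = application_sets[normalized]
--         return _stable_unique(
--             [
--                 value
--                 for member in app_set.get("applications", [])
--                 for value in expand_application(
--                     member, applications, application_sets, seen
--                 )
--             ]
--             + [
--                 value
--                 for member in app_set.get("application_sets", [])
--                 for value in expand_application(
--                     member, applications, application_sets, seen
--                 )
--             ]
--         )
--
--     if normalized in applications:
--         app = applications[normalized]
--         protocol = app.get("protocol", "")
--         destination_port = app.get("destination-port", "")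
--         if protocol and destination_port:
--             return [f"{protocol}/{destination_port}"]
--         return [normalized]
--
--     return [normalized]
-- ===== SOURCE B (Python) =====
-- _BROAD_APPS = {"any", "any-ipv4", "any-ipv6", "junos-any", "all", "*"}
--
--
-- def _normalize_broad(value):
--     text = (value or "").strip()
--     if text.lower() in _BROAD_APPS:
--         return "any"
--     return text
--
--
-- def _terminal(name, applications):
--     app = applications.get(name)
--     if app is not None:
--         protocol = app.get("protocol", "")
--         destination_port = app.get("destination-port", "")
--         if protocol and destination_port:
--             return f"{protocol}/{destination_port}"
--     return name
--
--
-- def expand_application(name, applications, application_sets, _seen=None):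
--     normalized = _normalize_broad(name)
--     if normalized == "any":
--         return ["any"]
--     blocked = set() if _seen is None else set(_seen)
--     if normalized in blocked:
--         return []
--     if normalized not in application_sets:
--         return [_terminal(normalized, applications)]
--
--     def targets(node):
--         entry = application_sets[node]
--         members = entry.get("applications", []) + entry.get("application_sets", [])
--         return [_normalize_broad(m) for m in members]
--
--     # saturate the set of application-set nodes reachable from the root,
--     # visiting each node once instead of once per path
--     visited = {normalized}
--     for _ in range(len(application_sets)):
--         grown = set(visited)
--         for node in visited:
--             for t in targets(node):
--                 if t != "any" and t not in blocked and t in application_sets: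
--                     grown.add(t)
--         visited = grown
--
--     terminals = set()
--     for node in visited:
--         for t in targets(node):
--             if t == "any":
--                 terminals.add("any")
--             elif t not in blocked and t not in application_sets:
--                 terminals.add(_terminal(t, applications))
--     return sorted(terminals)
-- ===== Notes on version B (the rewrite author's own statement) =====
-- stated objective: alternative
-- what changed: A expands the graph recursively once per path, copying the seen-set into every recursive call; B instead computes the set of application-set nodes reachable from the root by iterated saturation and then collects each reachable node's terminal values in a single pass before sorting.
import Mathlib
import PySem

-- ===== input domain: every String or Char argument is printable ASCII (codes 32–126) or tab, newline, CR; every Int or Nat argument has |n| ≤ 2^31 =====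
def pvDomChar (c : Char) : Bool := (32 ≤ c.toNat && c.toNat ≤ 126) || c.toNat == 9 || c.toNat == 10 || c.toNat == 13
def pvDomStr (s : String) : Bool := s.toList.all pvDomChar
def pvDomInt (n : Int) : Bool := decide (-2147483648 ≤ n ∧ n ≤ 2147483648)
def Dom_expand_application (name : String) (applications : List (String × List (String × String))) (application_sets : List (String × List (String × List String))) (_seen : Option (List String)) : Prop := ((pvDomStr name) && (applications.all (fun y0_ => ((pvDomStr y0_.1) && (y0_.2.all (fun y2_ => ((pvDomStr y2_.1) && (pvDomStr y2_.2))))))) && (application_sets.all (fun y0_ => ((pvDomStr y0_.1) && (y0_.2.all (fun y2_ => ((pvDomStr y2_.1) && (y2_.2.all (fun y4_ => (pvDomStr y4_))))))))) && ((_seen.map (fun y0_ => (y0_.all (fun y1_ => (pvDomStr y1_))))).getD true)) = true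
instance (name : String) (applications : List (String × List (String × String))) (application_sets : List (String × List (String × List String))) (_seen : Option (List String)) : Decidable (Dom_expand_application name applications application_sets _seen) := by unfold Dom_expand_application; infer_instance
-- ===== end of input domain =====

-- B replaces A's once-per-path recursive expansion by a saturation of the reachable
-- application-set nodes followed by one terminal-collection pass over them.

-- ===== PORT A =====

-- _normalize_broad (shared helper of both Python files)
def pvNorm (value : String) : String :=
  let text := PySem.Str.strip value
  if PySem.Str.lower text ∈ ["any", "any-ipv4", "any-ipv6", "junos-any", "all", "*"] then "any"
  else text

-- dict lookup on an association list (first match), used for every 'k in d' / 'd[k]' / 'd.get(k, dflt)'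
def pvLookup {β : Type} (l : List (String × β)) (k : String) : Option β :=
  match l with
  | [] => none
  | (a, b) :: t => if a = k then some b else pvLookup t k

-- _stable_unique
def pvStableUnique (values : List String) : List String :=
  let st := values.foldl
    (fun (st : PySem.Set String × List String) value =>
      if value ∈ st.1 then st else (PySem.Set.add st.1 value, st.2 ++ [value]))
    (PySem.Set.empty, [])
  PySem.List.sorted st.2 (fun x => x) false

-- seen = set() if _seen is None else set(_seen)
def pvSeenOf (_seen : Option (List String)) : PySem.Set String :=
  match _seen with
  | none => PySem.Set.empty
  | some l => PySem.Set.ofList l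

theorem pvLookup_mem_keys {β : Type} {l : List (String × β)} {k : String} {v : β}
    (h : pvLookup l k = some v) : k ∈ l.map Prod.fst := by
  induction l with
  | nil => simp [pvLookup] at h
  | cons p t ih =>
    obtain ⟨a, b⟩ := p
    by_cases hk : a = k
    · simp [hk]
    · simp [pvLookup, hk] at h
      simpa using Or.inr (ih h)

theorem pvFilter_le_of_imp {α : Type} (l : List α) (p q : α → Bool)
    (himp : ∀ x, q x = true → p x = true) :
    (l.filter q).length ≤ (l.filter p).length := by
  induction l with
  | nil => simp
  | cons b t ih =>
    cases hpb : p b <;> cases hqb : q b <;>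
      simp only [List.filter_cons, hpb, hqb, if_true, Bool.false_eq_true, if_false,
        List.length_cons]
    · exact ih
    · exact absurd (himp b hqb) (by simp [hpb])
    · omega
    · omega

theorem pvFilter_lt_of_imp {α : Type} (l : List α) (p q : α → Bool)
    (himp : ∀ x, q x = true → p x = true) (a : α) (ha : a ∈ l)
    (hpa : p a = true) (hqa : q a = false) :
    (l.filter q).length < (l.filter p).length := by
  induction l with
  | nil => simp at ha
  | cons b t ih =>
    rcases List.mem_cons.mp ha with rfl | hat
    · have h1 := pvFilter_le_of_imp t p q himp
      simp only [List.filter_cons, hpa, hqa, if_true, Bool.false_eq_true, if_false,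
        List.length_cons]
      omega
    · have h1 := ih hat
      cases hpb : p b <;> cases hqb : q b <;>
        simp only [List.filter_cons, hpb, hqb, if_true, Bool.false_eq_true, if_false,
          List.length_cons]
      · exact h1
      · exact absurd (himp b hqb) (by simp [hpb])
      · omega
      · omega

-- measure used by A's well-founded recursion: #(application_sets keys not yet seen)
def pvMeasure (application_sets : List (String × List (String × List String)))
    (_seen : Option (List String)) : Nat :=
  ((application_sets.map Prod.fst).filter (fun k => !(PySem.Set.contains (pvSeenOf _seen) k))).length

theorem pvSeenOf_nodup (_seen : Option (List String)) : (pvSeenOf _seen).Nodup := by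
  cases _seen
  · exact List.nodup_nil
  · exact PySem.Set.nodup_ofList _

theorem pvMeasure_lt (application_sets : List (String × List (String × List String)))
    (_seen : Option (List String)) {n : String} {e : List (String × List String)}
    (hmem : pvLookup application_sets n = some e) (hnot : n ∉ pvSeenOf _seen) :
    pvMeasure application_sets (some (PySem.Set.add (pvSeenOf _seen) n)) <
      pvMeasure application_sets _seen := by
  have hnd : (PySem.Set.add (pvSeenOf _seen) n).Nodup :=
    PySem.Set.nodup_add _ n (pvSeenOf_nodup _seen)
  unfold pvMeasure
  have hofl : pvSeenOf (some (PySem.Set.add (pvSeenOf _seen) n)) =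
      PySem.Set.add (pvSeenOf _seen) n := by
    simp only [pvSeenOf]; exact PySem.Set.ofList_eq_self_of_nodup _ hnd
  rw [hofl]
  refine pvFilter_lt_of_imp _ _ _ ?_ n (pvLookup_mem_keys hmem) ?_ ?_
  · intro x hx
    simp only [Bool.not_eq_true'] at hx ⊢
    rw [← Bool.not_eq_true, PySem.Set.contains_iff] at hx ⊢
    rw [PySem.Set.mem_add] at hx
    exact fun h2 => hx (Or.inl h2)
  · simpa [PySem.Set.contains_iff] using hnot
  · simp [PySem.Set.mem_add]

def expand_application (name : String) (applications : List (String × List (String × String))) (application_sets : List (String × List (String × List String))) (_seen : Option (List String)) : List String :=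
  let normalized := pvNorm name
  if normalized = "any" then ["any"]
  else
    let seen := pvSeenOf _seen
    if normalized ∈ seen then []
    else
      let seen2 := PySem.Set.add seen normalized
      match h : pvLookup application_sets normalized with
      | some app_set =>
          pvStableUnique
            ((((pvLookup app_set "applications").getD []).flatMap
                (fun member => expand_application member applications application_sets (some seen2)))
              ++ (((pvLookup app_set "application_sets").getD []).flatMap
                (fun member => expand_application member applications application_sets (some seen2))))
      | none =>
        match pvLookup applications normalized with
        | some app =>
            let protocol := (pvLookup app "protocol").getD ""
            let destination_port := (pvLookup app "destination-port").getD ""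
            if protocol ≠ "" ∧ destination_port ≠ "" then [protocol ++ "/" ++ destination_port]
            else [normalized]
        | none => [normalized]
termination_by pvMeasure application_sets _seen
decreasing_by
  all_goals
    exact pvMeasure_lt application_sets _seen h (by assumption)

-- ===== PORT B =====

-- _terminal
def pvTerminal (name : String) (applications : List (String × List (String × String))) : String :=
  match pvLookup applications name with
  | some app =>
      let protocol := (pvLookup app "protocol").getD ""
      let destination_port := (pvLookup app "destination-port").getD ""
      if protocol ≠ "" ∧ destination_port ≠ "" then protocol ++ "/" ++ destination_port
      else name
  | none => name

-- targets(node): the normalized members of an application-set node ([] when node is absent)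
def pvTargets (application_sets : List (String × List (String × List String))) (node : String) :
    List String :=
  match pvLookup application_sets node with
  | some entry =>
      (((pvLookup entry "applications").getD []) ++ ((pvLookup entry "application_sets").getD [])).map pvNorm
  | none => []

-- one saturation round: grown = set(visited); for node in visited: add the valid set-node targets
def pvGrow (application_sets : List (String × List (String × List String)))
    (blocked : PySem.Set String) (visited : PySem.Set String) : PySem.Set String :=
  visited.foldl
    (fun grown node =>
      (pvTargets application_sets node).foldl
        (fun grown t =>
          if t ≠ "any" ∧ ¬ t ∈ blocked ∧ (pvLookup application_sets t).isSome
          then PySem.Set.add grown t else grown)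
        grown)
    visited

-- the saturation loop: for _ in range(len(application_sets)): visited = grow(visited)
def pvIter (application_sets : List (String × List (String × List String)))
    (blocked : PySem.Set String) (root : String) : Nat → PySem.Set String
  | 0 => PySem.Set.add PySem.Set.empty root
  | k + 1 => pvGrow application_sets blocked (pvIter application_sets blocked root k)

-- the terminal-collection pass
def pvCollect (applications : List (String × List (String × String)))
    (application_sets : List (String × List (String × List String)))
    (blocked : PySem.Set String) (visited : PySem.Set String) : PySem.Set String :=
  visited.foldl
    (fun terms node =>
      (pvTargets application_sets node).foldl
        (fun terms t =>
          if t = "any" then PySem.Set.add terms "any"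
          else if ¬ t ∈ blocked ∧ (pvLookup application_sets t).isNone
          then PySem.Set.add terms (pvTerminal t applications) else terms)
        terms)
    PySem.Set.empty

def expand_application_alt (name : String) (applications : List (String × List (String × String))) (application_sets : List (String × List (String × List String))) (_seen : Option (List String)) : List String :=
  let normalized := pvNorm name
  if normalized = "any" then ["any"]
  else
    let blocked := pvSeenOf _seen
    if normalized ∈ blocked then []
    else
      match pvLookup application_sets normalized with
      | some _ =>
          let visited := pvIter application_sets blocked normalized application_sets.length
          PySem.List.sorted (pvCollect applications application_sets blocked visited) (fun x => x) false
      | none => [pvTerminal normalized applications]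

-- ===== PRECONDITION & SPEC =====
def Spec_expand_application (name : String) (applications : List (String × List (String × String))) (application_sets : List (String × List (String × List String))) (_seen : Option (List String)) (out : List String) : Prop := out = expand_application_alt name applications application_sets _seen
instance (name : String) (applications : List (String × List (String × String))) (application_sets : List (String × List (String × List String))) (_seen : Option (List String)) (out : List String) : Decidable (Spec_expand_application name applications application_sets _seen out) := by unfold Spec_expand_application; infer_instance

-- ===== CLAIM (what is proved, stated in full; the proofs are below) =====
def Claim_equal_expand_application : Prop := ∀ (name : String) (applications : List (String × List (String × String))) (application_sets : List (String × List (String × List String))) (_seen : Option (List String)), Dom_expand_application name applications application_sets _seen → Spec_expand_application name applications application_sets _seen (expand_application name applications application_sets _seen)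

-- ===== LEMMAS AND PROOFS =====

-- x is emitted as a terminal value directly from the application-set node u
def pvEmit (AP : List (String × List (String × String)))
    (AS : List (String × List (String × List String))) (bl : List String) (u x : String) : Prop :=
  ∃ t ∈ pvTargets AS u,
    ((t = "any" ∧ x = "any") ∨
      (t ≠ "any" ∧ t ∉ bl ∧ pvLookup AS t = none ∧ x = pvTerminal t AP))

-- one valid expansion edge between application-set nodes, avoiding S
def pvE (AS : List (String × List (String × List String))) (S : List String) (a b : String) : Prop :=
  b ∈ pvTargets AS a ∧ b ≠ "any" ∧ b ∉ S ∧ (pvLookup AS b).isSome = true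

-- length-indexed reachability along pvE edges
inductive pvRF (AS : List (String × List (String × List String))) (S : List String) :
    String → String → Nat → Prop where
  | refl (a : String) : pvRF AS S a a 0
  | head {a b u : String} {n : Nat} : pvE AS S a b → pvRF AS S b u n → pvRF AS S a u (n + 1)

-- x is collected when A expands the set node s with path set S (s already in S)
inductive pvCol (AP : List (String × List (String × String)))
    (AS : List (String × List (String × List String))) : List String → String → String → Prop where
  | any {S : List String} {s : String} : "any" ∈ pvTargets AS s → pvCol AP AS S s "any"
  | term {S : List String} {s t : String} : t ∈ pvTargets AS s → t ≠ "any" → t ∉ S →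
      pvLookup AS t = none → pvCol AP AS S s (pvTerminal t AP)
  | step {S : List String} {s t x : String} : t ∈ pvTargets AS s → t ≠ "any" → t ∉ S →
      (pvLookup AS t).isSome = true → pvCol AP AS (S ++ [t]) t x → pvCol AP AS S s x

-- what one recursive call of A contributes, as a predicate on the normalized name
def pvExpSpec (AP : List (String × List (String × String)))
    (AS : List (String × List (String × List String))) (S : List String) (t x : String) : Prop :=
  if t = "any" then x = "any"
  else if t ∈ S then False
  else if (pvLookup AS t).isSome then pvCol AP AS (S ++ [t]) t x
  else x = pvTerminal t AP

theorem pvCol_iff (AP : List (String × List (String × String)))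
    (AS : List (String × List (String × List String))) (S : List String) (s x : String) :
    pvCol AP AS S s x ↔ ∃ t ∈ pvTargets AS s, pvExpSpec AP AS S t x := by
  constructor
  · intro h
    cases h with
    | any hmem => exact ⟨"any", hmem, by simp [pvExpSpec]⟩
    | term hmem hany hS hnone =>
      exact ⟨_, hmem, by simp [pvExpSpec, hany, hS, hnone]⟩
    | step hmem hany hS hsome hcol =>
      exact ⟨_, hmem, by simp [pvExpSpec, hany, hS, hsome, hcol]⟩
  · rintro ⟨t, hmem, hspec⟩
    unfold pvExpSpec at hspec
    by_cases hany : t = "any"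
    · subst hany
      rw [if_pos rfl] at hspec
      subst hspec
      exact pvCol.any hmem
    · rw [if_neg hany] at hspec
      by_cases hS : t ∈ S
      · rw [if_pos hS] at hspec; exact absurd hspec (by simp)
      · rw [if_neg hS] at hspec
        by_cases hsome : (pvLookup AS t).isSome = true
        · rw [if_pos hsome] at hspec
          exact pvCol.step hmem hany hS hsome hspec
        · rw [if_neg hsome] at hspec
          subst hspec
          exact pvCol.term hmem hany hS (by simpa [Option.isSome_iff_ne_none] using hsome)

-- generic foldl membership engine
theorem pvFoldl_mem {F : PySem.Set String → String → PySem.Set String}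
    {P : String → String → Prop} (hF : ∀ a s y, y ∈ F a s ↔ y ∈ a ∨ P s y) :
    ∀ (v acc : List String) (y : String),
      y ∈ v.foldl F acc ↔ y ∈ acc ∨ ∃ s ∈ v, P s y := by
  intro v
  induction v with
  | nil => simp
  | cons b t ih =>
    intro acc y
    rw [List.foldl_cons, ih, hF]
    constructor
    · rintro (⟨hy | hP⟩ | ⟨s, hs, hP⟩)
      · exact Or.inl hy
      · exact Or.inr ⟨b, by simp, hP⟩
      · exact Or.inr ⟨s, by simp [hs], hP⟩
    · rintro (hy | ⟨s, hs, hP⟩)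
      · exact Or.inl (Or.inl hy)
      · rcases List.mem_cons.mp hs with rfl | hst
        · exact Or.inl (Or.inr hP)
        · exact Or.inr ⟨s, hst, hP⟩

theorem pvFoldl_nodup {F : PySem.Set String → String → PySem.Set String}
    (hN : ∀ a s, List.Nodup a → List.Nodup (F a s)) :
    ∀ (v acc : List String), List.Nodup acc → List.Nodup (v.foldl F acc) := by
  intro v
  induction v with
  | nil => intro acc h; simpa using h
  | cons b t ih => intro acc h; exact ih (F acc b) (hN acc b h)

theorem pvGrow_mem (AS : List (String × List (String × List String)))
    (bl v : List String) (y : String) :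
    y ∈ pvGrow AS bl v ↔
      y ∈ v ∨ ∃ s ∈ v, (y ∈ pvTargets AS s ∧ y ≠ "any" ∧ y ∉ bl ∧ (pvLookup AS y).isSome = true) := by
  have hstep : ∀ (a : PySem.Set String) (t y : String),
      y ∈ (if t ≠ "any" ∧ ¬ t ∈ bl ∧ (pvLookup AS t).isSome = true
            then PySem.Set.add a t else a) ↔
        y ∈ a ∨ ((t ≠ "any" ∧ ¬ t ∈ bl ∧ (pvLookup AS t).isSome = true) ∧ y = t) := by
    intro a t y
    split_ifs with hc
    · rw [PySem.Set.mem_add]; tauto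
    · tauto
  have hinner : ∀ (a : PySem.Set String) (s y : String),
      y ∈ (pvTargets AS s).foldl
          (fun grown t =>
            if t ≠ "any" ∧ ¬ t ∈ bl ∧ (pvLookup AS t).isSome = true
            then PySem.Set.add grown t else grown) a ↔
        y ∈ a ∨ (y ∈ pvTargets AS s ∧ y ≠ "any" ∧ y ∉ bl ∧ (pvLookup AS y).isSome = true) := by
    intro a s y
    rw [pvFoldl_mem hstep (pvTargets AS s) a y]
    constructor
    · rintro (hy | ⟨t, ht, hcond, rfl⟩)
      · exact Or.inl hy
      · exact Or.inr ⟨ht, hcond⟩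
    · rintro (hy | ⟨ht, hcond⟩)
      · exact Or.inl hy
      · exact Or.inr ⟨y, ht, hcond, rfl⟩
  unfold pvGrow
  exact pvFoldl_mem hinner v v y

theorem pvGrow_nodup (AS : List (String × List (String × List String)))
    (bl v : List String) (h : List.Nodup v) : List.Nodup (pvGrow AS bl v) := by
  unfold pvGrow
  apply pvFoldl_nodup _ v v h
  intro a node ha
  apply pvFoldl_nodup _ _ a ha
  intro a2 t ha2
  split_ifs with hc
  · exact PySem.Set.nodup_add _ _ ha2
  · exact ha2

theorem pvCollect_mem (AP : List (String × List (String × String)))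
    (AS : List (String × List (String × List String))) (bl v : List String) (y : String) :
    y ∈ pvCollect AP AS bl v ↔ ∃ s ∈ v, pvEmit AP AS bl s y := by
  have hstep : ∀ (a : PySem.Set String) (t y : String),
      y ∈ (if t = "any" then PySem.Set.add a "any"
            else if ¬ t ∈ bl ∧ (pvLookup AS t).isNone = true
            then PySem.Set.add a (pvTerminal t AP) else a) ↔
        y ∈ a ∨ ((t = "any" ∧ y = "any") ∨
          (t ≠ "any" ∧ t ∉ bl ∧ pvLookup AS t = none ∧ y = pvTerminal t AP)) := by
    intro a t y
    split_ifs with h1 h2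
    · rw [PySem.Set.mem_add]; subst h1; tauto
    · rw [PySem.Set.mem_add]
      rw [Option.isNone_iff_eq_none] at h2
      tauto
    · rw [Decidable.not_and_iff_not_or_not] at h2
      constructor
      · exact Or.inl
      · rintro (hy | ⟨h, _⟩ | ⟨_, hb, hn, _⟩)
        · exact hy
        · exact absurd h h1
        · rcases h2 with h2 | h2
          · exact absurd hb (by simpa using h2)
          · exact absurd (by simp [hn] : (pvLookup AS t).isNone = true) h2
  have hinner : ∀ (a : PySem.Set String) (s y : String),
      y ∈ (pvTargets AS s).foldl
          (fun terms t =>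
            if t = "any" then PySem.Set.add terms "any"
            else if ¬ t ∈ bl ∧ (pvLookup AS t).isNone = true
            then PySem.Set.add terms (pvTerminal t AP) else terms) a ↔
        y ∈ a ∨ pvEmit AP AS bl s y := by
    intro a s y
    rw [pvFoldl_mem hstep (pvTargets AS s) a y]
    unfold pvEmit
    exact Iff.rfl
  unfold pvCollect
  rw [pvFoldl_mem hinner v PySem.Set.empty y]
  simp [PySem.Set.empty]

theorem pvCollect_nodup (AP : List (String × List (String × String)))
    (AS : List (String × List (String × List String))) (bl v : List String) :
    List.Nodup (pvCollect AP AS bl v) := by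
  unfold pvCollect
  apply pvFoldl_nodup _ v PySem.Set.empty (by simp [PySem.Set.empty])
  intro a node ha
  apply pvFoldl_nodup _ _ a ha
  intro a2 t ha2
  split_ifs with h1 h2
  · exact PySem.Set.nodup_add _ _ ha2
  · exact PySem.Set.nodup_add _ _ ha2
  · exact ha2

theorem pvIter_nodup (AS : List (String × List (String × List String)))
    (bl : List String) (root : String) (k : Nat) : List.Nodup (pvIter AS bl root k) := by
  induction k with
  | zero => simp [pvIter, PySem.Set.add, PySem.Set.empty]
  | succ k ih => exact pvGrow_nodup AS bl _ ih

theorem pvIter_mono (AS : List (String × List (String × List String)))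
    (bl : List String) (root : String) {k k' : Nat} (h : k ≤ k') {y : String}
    (hy : y ∈ pvIter AS bl root k) : y ∈ pvIter AS bl root k' := by
  induction k' with
  | zero =>
    have hk0 : k = 0 := by omega
    subst hk0; exact hy
  | succ m ih =>
    rcases Nat.lt_or_ge k (m + 1) with hk | hk
    · exact (pvGrow_mem AS bl _ y).mpr (Or.inl (ih (by omega)))
    · have : k = m + 1 := by omega
      subst this; exact hy

theorem pvRoot_mem_iter (AS : List (String × List (String × List String)))
    (bl : List String) (root : String) (k : Nat) : root ∈ pvIter AS bl root k := by
  apply pvIter_mono AS bl root (Nat.zero_le k)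
  simp [pvIter, PySem.Set.add, PySem.Set.empty, PySem.Set.contains]

-- the _stable_unique fold: membership and nodup
theorem pvSU_fold (values : List String) :
    ∀ (s o : List String), (∀ y, y ∈ s ↔ y ∈ o) → List.Nodup o →
      (∀ y, y ∈ (values.foldl
          (fun (st : PySem.Set String × List String) value =>
            if value ∈ st.1 then st else (PySem.Set.add st.1 value, st.2 ++ [value])) (s, o)).2 ↔
          (y ∈ o ∨ y ∈ values)) ∧
        List.Nodup (values.foldl
          (fun (st : PySem.Set String × List String) value =>
            if value ∈ st.1 then st else (PySem.Set.add st.1 value, st.2 ++ [value])) (s, o)).2 := by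
  induction values with
  | nil =>
    intro s o hso hno
    exact ⟨fun y => by simp, hno⟩
  | cons v0 rest ih =>
    intro s o hso hno
    rw [List.foldl_cons]
    by_cases hv : v0 ∈ s
    · have hred : (if v0 ∈ (s, o).1 then (s, o)
          else (PySem.Set.add (s, o).1 v0, (s, o).2 ++ [v0])) = (s, o) := by
        simp [hv]
      rw [hred]
      obtain ⟨hm, hn⟩ := ih s o hso hno
      refine ⟨fun y => ?_, hn⟩
      rw [hm y]
      constructor
      · rintro (hy | hy)
        · exact Or.inl hy
        · exact Or.inr (List.mem_cons_of_mem _ hy)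
      · rintro (hy | hy)
        · exact Or.inl hy
        · rcases List.mem_cons.mp hy with h | hy2
          · exact Or.inl ((hso y).mp (by rw [h]; exact hv))
          · exact Or.inr hy2
    · have hred : (if v0 ∈ (s, o).1 then (s, o)
          else (PySem.Set.add (s, o).1 v0, (s, o).2 ++ [v0])) =
          (PySem.Set.add s v0, o ++ [v0]) := by
        simp [hv]
      rw [hred]
      have hso2 : ∀ y, y ∈ PySem.Set.add s v0 ↔ y ∈ o ++ [v0] := by
        intro y
        rw [PySem.Set.mem_add]
        simp [hso y]
      have hno2 : List.Nodup (o ++ [v0]) := by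
        rw [List.nodup_append]
        refine ⟨hno, List.nodup_singleton v0, ?_⟩
        intro a hao b hbv
        rw [List.mem_singleton] at hbv
        subst hbv
        intro h
        apply hv
        apply (hso b).mpr
        rw [← h]
        exact hao
      obtain ⟨hm, hn⟩ := ih (PySem.Set.add s v0) (o ++ [v0]) hso2 hno2
      refine ⟨fun y => ?_, hn⟩
      rw [hm y]
      simp only [List.mem_append, List.mem_cons]
      tauto

theorem pvStableUnique_spec (values : List String) :
    ∃ o : List String, pvStableUnique values = PySem.List.sorted o (fun x => x) false ∧
      (∀ y, y ∈ o ↔ y ∈ values) ∧ List.Nodup o := by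
  obtain ⟨hm, hn⟩ := pvSU_fold values PySem.Set.empty [] (by simp [PySem.Set.empty]) (by simp)
  exact ⟨_, rfl, fun y => by simpa using hm y, hn⟩

theorem pvRF_snoc {AS : List (String × List (String × List String))} {S : List String}
    {a u w : String} {n : Nat} (h : pvRF AS S a u n) (he : pvE AS S u w) :
    pvRF AS S a w (n + 1) := by
  induction h with
  | refl a => exact pvRF.head he (pvRF.refl w)
  | head hab _ ih => exact pvRF.head hab (ih he)

-- a walk from w avoiding S can be rerouted to avoid S ∪ {w} (or yields a shorter walk from w)
theorem pvSLem2 {AS : List (String × List (String × List String))} {S : List String}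
    {a u : String} {n : Nat} (h : pvRF AS S a u n) (w : String) :
    (∃ m, m ≤ n ∧ pvRF AS (S ++ [w]) a u m) ∨ (∃ m, m < n ∧ pvRF AS S w u m) := by
  induction h with
  | refl a => exact Or.inl ⟨0, Nat.le_refl 0, pvRF.refl a⟩
  | @head a b u n he tail ih =>
    by_cases hbw : b = w
    · subst hbw
      exact Or.inr ⟨n, Nat.lt_succ_self n, tail⟩
    · rcases ih with ⟨m, hm, h2⟩ | ⟨m, hm, h2⟩
      · refine Or.inl ⟨m + 1, by omega, pvRF.head ⟨he.1, he.2.1, ?_, he.2.2.2⟩ h2⟩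
        rw [List.mem_append]
        rintro (hb | hb)
        · exact he.2.2.1 hb
        · exact hbw (by simpa using hb)
      · exact Or.inr ⟨m, by omega, h2⟩

theorem pvSLem {AS : List (String × List (String × List String))} {S : List String} :
    ∀ (n : Nat) {w u : String}, pvRF AS S w u n → ∃ m, pvRF AS (S ++ [w]) w u m := by
  intro n
  induction n using Nat.strong_induction_on with
  | _ n ih =>
    intro w u h
    rcases pvSLem2 h w with ⟨m, _, h2⟩ | ⟨m, hm, h2⟩
    · exact ⟨m, h2⟩
    · exact ih m hm h2

theorem pvIter_sound (AS : List (String × List (String × List String)))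
    (bl : List String) (root : String) (k : Nat) {x : String}
    (hx : x ∈ pvIter AS bl root k) : ∃ n, pvRF AS bl root x n := by
  revert x
  induction k with
  | zero =>
    intro x hx
    have hxr : x = root := by
      simpa [pvIter, PySem.Set.add, PySem.Set.empty, PySem.Set.contains] using hx
    subst hxr
    exact ⟨0, pvRF.refl x⟩
  | succ k ih =>
    intro x hx
    rcases (pvGrow_mem AS bl _ x).mp hx with hx2 | ⟨s, hs, hts, hany, hbl2, hsome⟩
    · exact ih hx2
    · obtain ⟨n, hn⟩ := ih hs
      exact ⟨n + 1, pvRF_snoc hn ⟨hts, hany, hbl2, hsome⟩⟩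

theorem pvNodup_length_lt {l1 l2 : List String} (hsub : ∀ x ∈ l1, x ∈ l2)
    (h1 : List.Nodup l1) (h2 : List.Nodup l2) {x : String} (hx2 : x ∈ l2) (hx1 : x ∉ l1) :
    l1.length < l2.length := by
  have hfs : l1.toFinset ⊆ l2.toFinset := by
    intro a ha
    rw [List.mem_toFinset] at ha ⊢
    exact hsub a ha
  have hss : l1.toFinset ⊂ l2.toFinset := by
    refine ⟨hfs, fun hrev => ?_⟩
    exact hx1 (List.mem_toFinset.mp (hrev (List.mem_toFinset.mpr hx2)))
  calc l1.length = l1.toFinset.card := (List.toFinset_card_of_nodup h1).symm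
    _ < l2.toFinset.card := Finset.card_lt_card hss
    _ ≤ l2.length := List.toFinset_card_le l2

theorem pvIter_subset_keys (AS : List (String × List (String × List String)))
    (bl : List String) (root : String) (k : Nat) {x : String}
    (hx : x ∈ pvIter AS bl root k) : x = root ∨ x ∈ AS.map Prod.fst := by
  induction k with
  | zero =>
    left
    simpa [pvIter, PySem.Set.add, PySem.Set.empty, PySem.Set.contains] using hx
  | succ k ih =>
    rcases (pvGrow_mem AS bl _ x).mp hx with hx' | ⟨s, _, _, _, _, hsome⟩
    · exact ih hx'
    · obtain ⟨e, he⟩ := Option.isSome_iff_exists.mp hsome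
      exact Or.inr (pvLookup_mem_keys he)

theorem pvVisited_closed (AS : List (String × List (String × List String)))
    (bl : List String) (root : String)
    {s t : String} (hs : s ∈ pvIter AS bl root AS.length)
    (ht : t ∈ pvTargets AS s) (ha : t ≠ "any") (hb : t ∉ bl)
    (hk : (pvLookup AS t).isSome = true) : t ∈ pvIter AS bl root AS.length := by
  by_cases hstab : ∃ k, k < AS.length ∧
      ∀ y, y ∈ pvIter AS bl root (k + 1) → y ∈ pvIter AS bl root k
  · obtain ⟨k, hklt, hsub⟩ := hstab
    have hiter_eq : ∀ j, k ≤ j →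
        ∀ y, y ∈ pvIter AS bl root j ↔ y ∈ pvIter AS bl root k := by
      intro j
      induction j with
      | zero =>
        intro hj y
        have hk0 : k = 0 := by omega
        subst hk0; exact Iff.rfl
      | succ m ihm =>
        intro hj y
        rcases Nat.lt_or_ge k (m + 1) with h1 | h1
        · have hm : k ≤ m := by omega
          constructor
          · intro hy
            rcases (pvGrow_mem AS bl _ y).mp hy with hy2 | ⟨s', hs', hc⟩
            · exact (ihm hm y).mp hy2
            · exact hsub y ((pvGrow_mem AS bl _ y).mpr (Or.inr ⟨s', (ihm hm s').mp hs', hc⟩))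
          · intro hy
            exact pvIter_mono AS bl root (by omega) hy
        · have hkm : k = m + 1 := by omega
          subst hkm; exact Iff.rfl
    have hsk : s ∈ pvIter AS bl root k := (hiter_eq AS.length (by omega) s).mp hs
    have htk1 : t ∈ pvIter AS bl root (k + 1) :=
      (pvGrow_mem AS bl _ t).mpr (Or.inr ⟨s, hsk, ht, ha, hb, hk⟩)
    exact (hiter_eq AS.length (by omega) t).mpr (hsub t htk1)
  · have hgrow : ∀ k, k < AS.length →
        ∃ y, y ∈ pvIter AS bl root (k + 1) ∧ y ∉ pvIter AS bl root k := by
      intro k hk2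
      by_contra hc
      refine hstab ⟨k, hk2, fun y hy => ?_⟩
      by_contra hny
      exact hc ⟨y, hy, hny⟩
    have hlen : ∀ k, k ≤ AS.length → k + 1 ≤ (pvIter AS bl root k).length := by
      intro k
      induction k with
      | zero =>
        intro _
        simp [pvIter, PySem.Set.add, PySem.Set.empty, PySem.Set.contains]
      | succ m ihm =>
        intro hm
        obtain ⟨y, hy1, hy2⟩ := hgrow m (by omega)
        have hlt : (pvIter AS bl root m).length < (pvIter AS bl root (m + 1)).length :=
          pvNodup_length_lt (fun x hx => pvIter_mono AS bl root (Nat.le_succ m) hx)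
            (pvIter_nodup AS bl root m) (pvIter_nodup AS bl root (m + 1)) hy1 hy2
        have := ihm (by omega)
        omega
    have h1 : AS.length + 1 ≤ (pvIter AS bl root AS.length).length := hlen AS.length le_rfl
    have hsubfin : (pvIter AS bl root AS.length).toFinset ⊆ (root :: AS.map Prod.fst).toFinset := by
      intro a hafin
      rw [List.mem_toFinset] at hafin ⊢
      rcases pvIter_subset_keys AS bl root AS.length hafin with rfl | hmem
      · exact List.mem_cons_self
      · exact List.mem_cons_of_mem _ hmem
    have hcard_fin : ((root :: AS.map Prod.fst).toFinset).card ≤ AS.length + 1 := by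
      calc ((root :: AS.map Prod.fst).toFinset).card ≤ (root :: AS.map Prod.fst).length :=
            List.toFinset_card_le _
        _ = AS.length + 1 := by simp
    have hcard_ge : AS.length + 1 ≤ (pvIter AS bl root AS.length).toFinset.card := by
      rw [List.toFinset_card_of_nodup (pvIter_nodup AS bl root AS.length)]
      exact h1
    have heq : (pvIter AS bl root AS.length).toFinset = (root :: AS.map Prod.fst).toFinset :=
      Finset.eq_of_subset_of_card_le hsubfin (le_trans hcard_fin hcard_ge)
    obtain ⟨e, he⟩ := Option.isSome_iff_exists.mp hk
    have htfin : t ∈ (root :: AS.map Prod.fst).toFinset := by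
      rw [List.mem_toFinset]
      exact List.mem_cons_of_mem _ (pvLookup_mem_keys he)
    rw [← heq] at htfin
    exact List.mem_toFinset.mp htfin

theorem pvCol_to_emit (AP : List (String × List (String × String)))
    (AS : List (String × List (String × List String))) (bl : List String) (root : String) :
    ∀ {S : List String} {s x : String}, pvCol AP AS S s x →
      (∀ y ∈ bl, y ∈ S) →
      (∀ y ∈ S, y ∈ bl ∨ y ∈ pvIter AS bl root AS.length) →
      s ∈ pvIter AS bl root AS.length →
      ∃ s', s' ∈ pvIter AS bl root AS.length ∧ pvEmit AP AS bl s' x := by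
  intro S s x hcol
  induction hcol with
  | @any S s hmem =>
    intro _ _ hs
    exact ⟨s, hs, "any", hmem, Or.inl ⟨rfl, rfl⟩⟩
  | @term S s t hmem hany hS hnone =>
    intro hbl _ hs
    exact ⟨s, hs, t, hmem, Or.inr ⟨hany, fun hbm => hS (hbl t hbm), hnone, rfl⟩⟩
  | @step S s t x hmem hany hS hsome hcol2 ih =>
    intro hbl hinv hs
    have htnb : t ∉ bl := fun hbm => hS (hbl t hbm)
    have htv : t ∈ pvIter AS bl root AS.length :=
      pvVisited_closed AS bl root hs hmem hany htnb hsome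
    refine ih (fun y hy => List.mem_append_left _ (hbl y hy)) (fun y hy => ?_) htv
    rcases List.mem_append.mp hy with hy2 | hy2
    · exact hinv y hy2
    · rw [List.mem_singleton] at hy2
      subst hy2
      exact Or.inr htv

theorem pvNotContains_true {S : List String} {b : String} (h : b ∉ S) :
    (!PySem.Set.contains S b) = true := by
  cases hc : PySem.Set.contains S b
  · rfl
  · exact absurd ((PySem.Set.contains_iff S b).mp hc) h

theorem pvNotContains_false {S : List String} {b : String} (h : b ∈ S) :
    (!PySem.Set.contains S b) = false := by
  have : PySem.Set.contains S b = true := (PySem.Set.contains_iff S b).mpr h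
  rw [this]
  rfl

theorem pvCruxL (AP : List (String × List (String × String)))
    (AS : List (String × List (String × List String))) (bl : List String) :
    ∀ (N : Nat) (S : List String) (a u x : String) (n : Nat),
      ((AS.map Prod.fst).filter (fun k => !(PySem.Set.contains S k))).length ≤ N →
      (∀ y ∈ bl, y ∈ S) →
      (∀ y ∈ S, y ∈ bl ∨ (pvLookup AS y).isSome = true) →
      pvRF AS S a u n → pvEmit AP AS bl u x → pvCol AP AS S a x := by
  have hbase : ∀ (S : List String) (u x : String),
      (∀ y ∈ S, y ∈ bl ∨ (pvLookup AS y).isSome = true) →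
      pvEmit AP AS bl u x → pvCol AP AS S u x := by
    intro S u x hinv ⟨t, ht, hcase⟩
    rcases hcase with ⟨rfl, rfl⟩ | ⟨hany, hnb, hnone, rfl⟩
    · exact pvCol.any ht
    · refine pvCol.term ht hany (fun hts => ?_) hnone
      rcases hinv t hts with h | h
      · exact hnb h
      · simp [hnone] at h
  intro N
  induction N with
  | zero =>
    intro S a u x n hN hbl hinv hrf hemit
    cases hrf with
    | refl => exact hbase S _ x hinv hemit
    | @head _ b _ n2 he tail =>
      exfalso
      obtain ⟨e, hel⟩ := Option.isSome_iff_exists.mp he.2.2.2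
      have hbf : b ∈ (AS.map Prod.fst).filter (fun k => !(PySem.Set.contains S k)) := by
        rw [List.mem_filter]
        refine ⟨pvLookup_mem_keys hel, ?_⟩
        exact pvNotContains_true he.2.2.1
      have := List.length_pos_of_mem hbf
      omega
  | succ N ih =>
    intro S a u x n hN hbl hinv hrf hemit
    cases hrf with
    | refl => exact hbase S _ x hinv hemit
    | @head _ b _ n2 he tail =>
      obtain ⟨m, h2⟩ := pvSLem n2 tail
      apply pvCol.step he.1 he.2.1 he.2.2.1 he.2.2.2
      apply ih (S ++ [b]) b u x m ?_ ?_ ?_ h2 hemit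
      · obtain ⟨e, hel⟩ := Option.isSome_iff_exists.mp he.2.2.2
        have hlt : ((AS.map Prod.fst).filter
              (fun k => !(PySem.Set.contains (S ++ [b]) k))).length <
            ((AS.map Prod.fst).filter (fun k => !(PySem.Set.contains S k))).length := by
          refine pvFilter_lt_of_imp _ _ _ ?_ b (pvLookup_mem_keys hel) ?_ ?_
          · intro k hk
            have hkn : k ∉ S ++ [b] := by
              intro hmm2
              rw [pvNotContains_false hmm2] at hk
              exact Bool.false_ne_true hk
            exact pvNotContains_true (fun hkS => hkn (List.mem_append_left _ hkS))
          · exact pvNotContains_true he.2.2.1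
          · exact pvNotContains_false (List.mem_append_right _ (List.mem_singleton.mpr rfl))
        omega
      · intro y hy
        exact List.mem_append_left _ (hbl y hy)
      · intro y hy
        rcases List.mem_append.mp hy with hy2 | hy2
        · exact hinv y hy2
        · rw [List.mem_singleton] at hy2
          subst hy2
          exact Or.inr he.2.2.2

theorem pvEmit_to_col (AP : List (String × List (String × String)))
    (AS : List (String × List (String × List String))) (bl : List String) (n0 : String)
    (hn0 : (pvLookup AS n0).isSome = true)
    {s x : String} (hs : s ∈ pvIter AS bl n0 AS.length) (he : pvEmit AP AS bl s x) :
    pvCol AP AS (bl ++ [n0]) n0 x := by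
  obtain ⟨n, hrf⟩ := pvIter_sound AS bl n0 AS.length hs
  obtain ⟨m, hrf2⟩ := pvSLem n hrf
  refine pvCruxL AP AS bl _ (bl ++ [n0]) n0 s x m le_rfl
    (fun y hy => List.mem_append_left _ hy) (fun y hy => ?_) hrf2 he
  rcases List.mem_append.mp hy with hy2 | hy2
  · exact Or.inl hy2
  · rw [List.mem_singleton] at hy2
    subst hy2
    exact Or.inr hn0

theorem pvExists_bridge {α β : Type} (l1 l2 : List α) (g : α → β)
    (f : α → List String) (x : String) (Q : β → Prop) (h : ∀ a, x ∈ f a ↔ Q (g a)) :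
    (x ∈ l1.flatMap f ++ l2.flatMap f) ↔ ∃ b ∈ (l1 ++ l2).map g, Q b := by
  rw [List.mem_append, List.mem_flatMap, List.mem_flatMap]
  constructor
  · rintro (⟨a, ha, hx⟩ | ⟨a, ha, hx⟩)
    · exact ⟨g a, List.mem_map_of_mem (List.mem_append_left _ ha), (h a).mp hx⟩
    · exact ⟨g a, List.mem_map_of_mem (List.mem_append_right _ ha), (h a).mp hx⟩
  · rintro ⟨b, hb, hq⟩
    obtain ⟨a, ha, rfl⟩ := List.mem_map.mp hb
    rcases List.mem_append.mp ha with ha2 | ha2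
    · exact Or.inl ⟨a, ha2, (h a).mpr hq⟩
    · exact Or.inr ⟨a, ha2, (h a).mpr hq⟩

-- A's recursive expansion computes exactly pvExpSpec
set_option maxHeartbeats 2000000 in
theorem pvA_mem (AP : List (String × List (String × String)))
    (AS : List (String × List (String × List String))) :
    ∀ (N : Nat) (S : List String), List.Nodup S →
      ((AS.map Prod.fst).filter (fun k => !(PySem.Set.contains S k))).length ≤ N →
      ∀ (m x : String),
        (x ∈ expand_application m AP AS (some S) ↔ pvExpSpec AP AS S (pvNorm m) x) := by
  intro N
  induction N using Nat.strong_induction_on with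
  | _ N ih =>
    intro S hS hN m x
    have hof : pvSeenOf (some S) = S := by
      simp only [pvSeenOf]
      exact PySem.Set.ofList_eq_self_of_nodup _ hS
    rw [expand_application]
    simp only [hof]
    by_cases hany : pvNorm m = "any"
    · rw [if_pos hany]
      simp [pvExpSpec, hany]
    · rw [if_neg hany]
      by_cases hmem : pvNorm m ∈ S
      · rw [if_pos hmem]
        simp [pvExpSpec, hany, hmem]
      · rw [if_neg hmem]
        split
        case h_2 heq =>
          -- not an application set: terminal value
          simp only [pvExpSpec, if_neg hany, if_neg hmem, heq, Option.isSome_none,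
            Bool.false_eq_true, if_false]
          unfold pvTerminal
          cases hA : pvLookup AP (pvNorm m) <;> simp only [hA]
          · simp
          · split_ifs <;> simp
        case h_1 app_set heq =>
          have hS2nd : (PySem.Set.add S (pvNorm m)).Nodup := PySem.Set.nodup_add _ _ hS
          have hS2eq : PySem.Set.add S (pvNorm m) = S ++ [pvNorm m] :=
            PySem.Set.add_of_not_mem hmem
          have hlt : ((AS.map Prod.fst).filter
                (fun k => !(PySem.Set.contains (PySem.Set.add S (pvNorm m)) k))).length <
              ((AS.map Prod.fst).filter (fun k => !(PySem.Set.contains S k))).length := by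
            refine pvFilter_lt_of_imp _ _ _ ?_ (pvNorm m) (pvLookup_mem_keys heq) ?_ ?_
            · intro k hk
              have hkn : k ∉ PySem.Set.add S (pvNorm m) := by
                intro hmm2
                rw [pvNotContains_false hmm2] at hk
                exact Bool.false_ne_true hk
              exact pvNotContains_true
                (fun hkS => hkn ((PySem.Set.mem_add _ _ _).mpr (Or.inl hkS)))
            · exact pvNotContains_true hmem
            · exact pvNotContains_false ((PySem.Set.mem_add _ _ _).mpr (Or.inr rfl))
          have hIH : ∀ (member : String) (y : String),
              y ∈ expand_application member AP AS (some (PySem.Set.add S (pvNorm m))) ↔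
                pvExpSpec AP AS (S ++ [pvNorm m]) (pvNorm member) y := by
            intro member y
            rw [← hS2eq]
            exact ih _ (by omega) (PySem.Set.add S (pvNorm m)) hS2nd le_rfl member y
          obtain ⟨o, hoeq, hom, _⟩ := pvStableUnique_spec
            ((((pvLookup app_set "applications").getD []).flatMap
                (fun member => expand_application member AP AS (some (PySem.Set.add S (pvNorm m)))))
              ++ (((pvLookup app_set "application_sets").getD []).flatMap
                (fun member => expand_application member AP AS (some (PySem.Set.add S (pvNorm m))))))
          rw [hoeq, PySem.List.mem_sorted, hom x]
          have hrhs : pvExpSpec AP AS S (pvNorm m) x ↔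
              pvCol AP AS (S ++ [pvNorm m]) (pvNorm m) x := by
            simp [pvExpSpec, hany, hmem, heq]
          rw [hrhs, pvCol_iff]
          have htg : pvTargets AS (pvNorm m) =
              ((((pvLookup app_set "applications").getD [])
                ++ ((pvLookup app_set "application_sets").getD [])) : List String).map pvNorm := by
            simp [pvTargets, heq]
          rw [htg]
          exact pvExists_bridge _ _ pvNorm _ x _ (fun a => hIH a x)

set_option maxHeartbeats 2000000 in
theorem pvMainSet (AP : List (String × List (String × String)))
    (AS : List (String × List (String × List String))) (bl : List String)
    (hbl : List.Nodup bl) (n0 : String) (e : List (String × List String))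
    (hn0 : pvLookup AS n0 = some e) (hbl0 : n0 ∉ bl) :
    pvStableUnique
        ((((pvLookup e "applications").getD []).flatMap
            (fun member => expand_application member AP AS (some (PySem.Set.add bl n0))))
          ++ (((pvLookup e "application_sets").getD []).flatMap
            (fun member => expand_application member AP AS (some (PySem.Set.add bl n0))))) =
      PySem.List.sorted (pvCollect AP AS bl (pvIter AS bl n0 AS.length)) (fun x => x) false := by
  have hS2eq : PySem.Set.add bl n0 = bl ++ [n0] := PySem.Set.add_of_not_mem hbl0
  have hS2nd : (PySem.Set.add bl n0).Nodup := PySem.Set.nodup_add _ _ hbl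
  have hIH : ∀ (member z : String),
      z ∈ expand_application member AP AS (some (PySem.Set.add bl n0)) ↔
        pvExpSpec AP AS (bl ++ [n0]) (pvNorm member) z := by
    intro member z
    rw [← hS2eq]
    exact pvA_mem AP AS _ (PySem.Set.add bl n0) hS2nd le_rfl member z
  set E := fun member => expand_application member AP AS (some (PySem.Set.add bl n0)) with hE
  set l1 := (pvLookup e "applications").getD ([] : List String) with hl1
  set l2 := (pvLookup e "application_sets").getD ([] : List String) with hl2
  obtain ⟨o, hoeq, hom, honod⟩ := pvStableUnique_spec (l1.flatMap E ++ l2.flatMap E)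
  rw [hoeq, PySem.List.sorted_id_eq_sorted_id_iff_perm,
    List.perm_ext_iff_of_nodup honod (pvCollect_nodup AP AS bl _)]
  intro y
  rw [hom y]
  have htg : pvTargets AS n0 = ((l1 ++ l2) : List String).map pvNorm := by
    simp [pvTargets, hn0, hl1, hl2]
  have hbr := pvExists_bridge l1 l2 pvNorm E y
    (fun t => pvExpSpec AP AS (bl ++ [n0]) t y) (fun a => hIH a y)
  rw [hbr, ← htg, ← pvCol_iff, pvCollect_mem AP AS bl _ y]
  have hn0s : (pvLookup AS n0).isSome = true := by rw [hn0]; rfl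
  constructor
  · intro hcol
    exact pvCol_to_emit AP AS bl n0 hcol
      (fun z hz => List.mem_append_left _ hz)
      (fun z hz => by
        rcases List.mem_append.mp hz with hz2 | hz2
        · exact Or.inl hz2
        · rw [List.mem_singleton] at hz2
          subst hz2
          exact Or.inr (pvRoot_mem_iter AS bl z AS.length))
      (pvRoot_mem_iter AS bl n0 AS.length)
  · rintro ⟨s, hsv, hemit⟩
    exact pvEmit_to_col AP AS bl n0 hn0s hsv hemit

theorem expand_application_eq_alt (name : String)
    (applications : List (String × List (String × String)))
    (application_sets : List (String × List (String × List String)))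
    (_seen : Option (List String)) :
    expand_application name applications application_sets _seen =
      expand_application_alt name applications application_sets _seen := by
  rw [expand_application]
  unfold expand_application_alt
  by_cases hany : pvNorm name = "any"
  · rw [if_pos hany, if_pos hany]
  · rw [if_neg hany, if_neg hany]
    by_cases hmem : pvNorm name ∈ pvSeenOf _seen
    · rw [if_pos hmem, if_pos hmem]
    · rw [if_neg hmem, if_neg hmem]
      split
      case h_1 app_set heq =>
        rw [heq]
        exact pvMainSet applications application_sets (pvSeenOf _seen)
          (pvSeenOf_nodup _seen) (pvNorm name) app_set heq hmem
      case h_2 heq =>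
        rw [heq]
        unfold pvTerminal
        cases hA : pvLookup applications (pvNorm name) <;> simp only [hA]
        all_goals first
        | rfl
        | (split_ifs <;> rfl)

-- ===== VERDICT (by name: the statement is the Claim_ definition above) =====
theorem expand_application_spec : Claim_equal_expand_application := by
  intro name applications application_sets _seen _hdom
  unfold Spec_expand_application
  exact expand_application_eq_alt name applications application_sets _seen
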